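-- pv_equiv track=rewrite | github.com/ndellomoevenly/schedule-viewer | schedule-viewer/scripts/join_data.py | find_location_by_address
-- ===== SOURCE A (Python) =====
-- from typing import List, Dict, Any, Optional
--
-- def find_location_by_address(address: str, locations: List[Dict[str, str]]) -> Optional[str]:
--     """Find job location name by address."""
--     if not address:
--         return None
--
--     # Try exact match first
--     for loc in locations:
--         if loc.get('Location', '') == address:
--             return loc.get('Job', '')
--
--     # Try partial match
--     for loc in locations:
--         location_addr = loc.get('Location', '')
--         if location_addr and location_addr.split(',')[0] in address:
--             return loc.get('Job', '')
--
--     return None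
-- ===== SOURCE B (Python) =====
-- def find_location_by_address(address, locations):
--     """Find job location name by address (single pass, exact match wins)."""
--     if not address:
--         return None
--     candidate = None
--     for loc in locations:
--         addr = loc.get('Location', '')
--         if addr == address:
--             return loc.get('Job', '')
--         if candidate is None and addr and addr.split(',')[0] in address:
--             candidate = loc.get('Job', '')
--     return candidate
-- ===== Notes on version B (the rewrite author's own statement) =====
-- stated objective: simpler
-- what changed: Replaces A's two sequential scans (exact pass, then partial pass) by one single pass that returns immediately on an exact match and remembers only the first partial candidate for after the loop.
import Mathlib
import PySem

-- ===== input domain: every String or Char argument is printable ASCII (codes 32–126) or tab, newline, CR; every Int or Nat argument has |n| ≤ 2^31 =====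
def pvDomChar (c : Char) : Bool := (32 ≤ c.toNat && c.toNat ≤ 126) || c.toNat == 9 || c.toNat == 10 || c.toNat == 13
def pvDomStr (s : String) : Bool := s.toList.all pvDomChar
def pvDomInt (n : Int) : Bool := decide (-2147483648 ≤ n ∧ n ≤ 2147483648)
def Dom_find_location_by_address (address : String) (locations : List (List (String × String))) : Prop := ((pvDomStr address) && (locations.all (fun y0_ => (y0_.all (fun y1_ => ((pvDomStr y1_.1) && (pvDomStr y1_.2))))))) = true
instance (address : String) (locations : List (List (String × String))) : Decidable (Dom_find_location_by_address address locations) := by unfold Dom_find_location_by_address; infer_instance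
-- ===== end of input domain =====

-- B changes the decomposition only: one pass with an early exact return and a stored first
-- partial candidate, instead of A's two full scans; same results, no speed claim.

-- shared primitive: Python's dict.get(k, dflt) on an association list (first match)
def dictGetD (loc : List (String × String)) (k dflt : String) : String :=
  ((loc.find? (fun p => p.1 == k)).map Prod.snd).getD dflt

-- shared primitive: Python's s.split(',')[0] — exact: the separator is nonempty, so
-- split? is some and the resulting list is nonempty, so index 0 never raises
def firstPart (s : String) : String :=
  PySem.List.pyGetD ((PySem.Str.split? s ",").getD []) 0 ""

-- ===== PORT A =====
-- exact-match test of A's first loop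
def exactP (address : String) (loc : List (String × String)) : Bool :=
  dictGetD loc "Location" "" == address

-- partial-match test of A's second loop: location_addr and location_addr.split(',')[0] in address
def partP (address : String) (loc : List (String × String)) : Bool :=
  let location_addr := dictGetD loc "Location" ""
  (location_addr != "") && PySem.Str.isIn (firstPart location_addr) address

def find_location_by_address (address : String) (locations : List (List (String × String))) : Option String :=
  if address = "" then none
  else
    match locations.find? (exactP address) with
    | some loc => some (dictGetD loc "Job" "")
    | none =>
      match locations.find? (partP address) with
      | some loc => some (dictGetD loc "Job" "")
      | none => none

-- ===== PORT B =====
-- single pass: return at once on an exact match, remember the first partial candidate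
def goB (address : String) (cand : Option String) : List (List (String × String)) → Option String
  | [] => cand
  | loc :: rest =>
    let addr := dictGetD loc "Location" ""
    if addr == address then some (dictGetD loc "Job" "")
    else
      let cand' :=
        if cand.isNone && ((addr != "") && PySem.Str.isIn (firstPart addr) address)
        then some (dictGetD loc "Job" "")
        else cand
      goB address cand' rest

def find_location_by_address_alt (address : String) (locations : List (List (String × String))) : Option String :=
  if address = "" then none
  else goB address none locations

-- ===== PRECONDITION & SPEC =====
def Spec_find_location_by_address (address : String) (locations : List (List (String × String))) (out : Option String) : Prop := out = find_location_by_address_alt address locations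
instance (address : String) (locations : List (List (String × String))) (out : Option String) : Decidable (Spec_find_location_by_address address locations out) := by unfold Spec_find_location_by_address; infer_instance

-- ===== CLAIM (what is proved, stated in full; the proofs are below) =====
def Claim_equal_find_location_by_address : Prop := ∀ (address : String) (locations : List (List (String × String))), Dom_find_location_by_address address locations → Spec_find_location_by_address address locations (find_location_by_address address locations)

-- ===== LEMMAS AND PROOFS =====
-- Invariant of B's loop: one pass with candidate `cand` equals A's two-scan shape,
-- with `cand` taking precedence over the partial scan.
theorem goB_eq (address : String) (ls : List (List (String × String))) (cand : Option String) :
    goB address cand ls =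
      match ls.find? (exactP address) with
      | some loc => some (dictGetD loc "Job" "")
      | none =>
        match cand with
        | some c => some c
        | none =>
          match ls.find? (partP address) with
          | some loc => some (dictGetD loc "Job" "")
          | none => none := by
  induction ls generalizing cand with
  | nil => cases cand <;> rfl
  | cons loc rest ih =>
    simp only [goB, List.find?_cons]
    cases hex : (dictGetD loc "Location" "" == address) with
    | true => simp [exactP, hex]
    | false =>
      simp only [exactP, hex, Bool.false_eq_true, if_false]
      rw [ih]
      cases cand with
      | some c => simp
      | none =>
        cases hp : ((dictGetD loc "Location" "" != "") &&
            PySem.Str.isIn (firstPart (dictGetD loc "Location" "")) address) with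
        | true =>
          have hp' : partP address loc = true := by simpa [partP] using hp
          simp [hp']
        | false =>
          have hp' : partP address loc = false := by simpa [partP] using hp
          simp [hp']

theorem find_location_by_address_spec : Claim_equal_find_location_by_address := by
  intro address locations _
  unfold Spec_find_location_by_address find_location_by_address find_location_by_address_alt
  by_cases h : address = ""
  · simp [h]
  · simp only [if_neg h]
    rw [goB_eq]
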